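-- pv_equiv track=rewrite | github.com/Paspatate/Moore-neighborhood-cellular-automata | ca.py | ca_moore_neighborhood
-- ===== SOURCE A (Python) =====
-- def ca_moore_neighborhood(tab:list, num_max_neighbor:int):
--     newtab = [[0 for i in range(len(tab[j]))] for j in range(len(tab))]
--     for y in range(len(tab)):
--         for x in range(len(tab[y])):
--             wall = get_num_surr_wall(tab, x, y)
--             if wall > num_max_neighbor:
--                 newtab[y][x] = 1
--             elif wall < num_max_neighbor:
--                 newtab[y][x] = 0
--             else:
--                 newtab[y][x] = tab[y][x]
--     return newtab
--
-- def get_num_surr_wall(tab:list, gridx:int, gridy:int):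
--     wall_count = 0
--
--     for y in range(gridy-1,gridy+2):
--         for x in range(gridx-1, gridx+2):
--             if y >= 0 and y < len(tab) and x >= 0 and x < len(tab[y]):
--                 wall_count += tab[y][x]
--             else:
--                 wall_count += 1
--     return wall_count
-- ===== SOURCE B (Python) =====
-- def ca_moore_neighborhood(tab: list, num_max_neighbor: int):
--     # Per-row prefix sums, then each 3x3 neighborhood sum is three O(1)
--     # window queries (out-of-bounds cells, and whole missing rows, count as 1).
--     n = len(tab)
--     prefs = []
--     for row in tab:
--         p = [0]
--         s = 0
--         for v in row:
--             s += v
--             p.append(s)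
--         prefs.append(p)
--
--     def row_window(r, x):
--         if r < 0 or r >= n:
--             return 3
--         m = len(tab[r])
--         lo = max(x - 1, 0)
--         hi = min(x + 2, m)
--         inside = prefs[r][hi] - prefs[r][lo] if hi > lo else 0
--         width = hi - lo if hi > lo else 0
--         return inside + (3 - width)
--
--     out = []
--     for y, row in enumerate(tab):
--         new = []
--         for x, v in enumerate(row):
--             w = row_window(y - 1, x) + row_window(y, x) + row_window(y + 1, x)
--             if w > num_max_neighbor:
--                 new.append(1)
--             elif w < num_max_neighbor:
--                 new.append(0)
--             else:
--                 new.append(v)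
--         out.append(new)
--     return out
-- ===== Notes on version B (the rewrite author's own statement) =====
-- stated objective: alternative
-- what changed: Replaces the per-cell 9-neighbor double scan with per-row prefix sums built once, so each cell's Moore-neighborhood sum becomes three O(1) inclusion-exclusion window queries (out-of-bounds positions and missing rows counted as walls), and builds the output by enumeration instead of mutating a zero grid.
import Mathlib
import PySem

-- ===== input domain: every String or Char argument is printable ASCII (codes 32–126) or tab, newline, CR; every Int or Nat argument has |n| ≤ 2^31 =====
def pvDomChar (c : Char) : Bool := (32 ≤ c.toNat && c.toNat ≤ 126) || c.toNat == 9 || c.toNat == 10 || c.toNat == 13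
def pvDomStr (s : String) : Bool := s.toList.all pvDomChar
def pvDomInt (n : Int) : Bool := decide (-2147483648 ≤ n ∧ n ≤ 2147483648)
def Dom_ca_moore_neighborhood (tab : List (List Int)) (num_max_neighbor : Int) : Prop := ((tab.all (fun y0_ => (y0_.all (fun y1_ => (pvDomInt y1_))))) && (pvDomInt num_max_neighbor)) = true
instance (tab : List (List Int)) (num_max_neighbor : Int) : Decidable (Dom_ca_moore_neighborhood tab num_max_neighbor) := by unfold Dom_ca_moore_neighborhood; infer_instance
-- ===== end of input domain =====

-- B replaces the per-cell 9-neighbor scan by per-row prefix sums queried with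
-- three O(1) window lookups per cell (constant-factor change; same O(rows*cols) asymptotics).

-- ===== PORT A =====
def getNumSurrWall (tab : List (List Int)) (gridx gridy : Int) : Int :=
  (PySem.List.pyRange (gridy - 1) (gridy + 2) 1).foldl (fun wallCount y =>
    (PySem.List.pyRange (gridx - 1) (gridx + 2) 1).foldl (fun wallCount x =>
      if 0 ≤ y ∧ y < (tab.length : Int) ∧ 0 ≤ x ∧ x < ((PySem.List.pyGetD tab y []).length : Int) then
        wallCount + PySem.List.pyGetD (PySem.List.pyGetD tab y []) x 0
      else
        wallCount + 1) wallCount) 0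

def ca_moore_neighborhood (tab : List (List Int)) (num_max_neighbor : Int) : List (List Int) :=
  let newtab : List (List Int) := (PySem.List.pyRange 0 (tab.length : Int) 1).map (fun j =>
    (PySem.List.pyRange 0 ((PySem.List.pyGetD tab j []).length : Int) 1).map (fun _ => (0 : Int)))
  (PySem.List.pyRange 0 (tab.length : Int) 1).foldl (fun nt y =>
    (PySem.List.pyRange 0 ((PySem.List.pyGetD tab y []).length : Int) 1).foldl (fun nt x =>
      let wall := getNumSurrWall tab x y
      let v : Int :=
        if wall > num_max_neighbor then 1
        else if wall < num_max_neighbor then 0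
        else PySem.List.pyGetD (PySem.List.pyGetD tab y []) x 0
      PySem.List.pySetD nt y (PySem.List.pySetD (PySem.List.pyGetD nt y []) x v)) nt) newtab

-- ===== PORT B =====
def prefixRow (row : List Int) : List Int :=
  (row.foldl (fun (acc : List Int × Int) v => (acc.1 ++ [acc.2 + v], acc.2 + v)) ([0], 0)).1

def rowWindow (tab : List (List Int)) (prefs : List (List Int)) (r x : Int) : Int :=
  if r < 0 ∨ (tab.length : Int) ≤ r then 3
  else
    let m : Int := ((PySem.List.pyGetD tab r []).length : Int)
    let lo := max (x - 1) 0
    let hi := min (x + 2) m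
    let inside :=
      if lo < hi then
        PySem.List.pyGetD (PySem.List.pyGetD prefs r []) hi 0 -
          PySem.List.pyGetD (PySem.List.pyGetD prefs r []) lo 0
      else 0
    let width := if lo < hi then hi - lo else 0
    inside + (3 - width)

def ca_moore_neighborhood_alt (tab : List (List Int)) (num_max_neighbor : Int) : List (List Int) :=
  let prefs := tab.map prefixRow
  (PySem.List.enumerate tab 0).map (fun yrow =>
    (PySem.List.enumerate yrow.2 0).map (fun xv =>
      let w := rowWindow tab prefs (yrow.1 - 1) xv.1 + rowWindow tab prefs yrow.1 xv.1 +
        rowWindow tab prefs (yrow.1 + 1) xv.1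
      if w > num_max_neighbor then 1
      else if w < num_max_neighbor then 0
      else xv.2))

-- ===== PRECONDITION & SPEC =====
def Spec_ca_moore_neighborhood (tab : List (List Int)) (num_max_neighbor : Int) (out : List (List Int)) : Prop := out = ca_moore_neighborhood_alt tab num_max_neighbor
instance (tab : List (List Int)) (num_max_neighbor : Int) (out : List (List Int)) : Decidable (Spec_ca_moore_neighborhood tab num_max_neighbor out) := by unfold Spec_ca_moore_neighborhood; infer_instance

-- ===== CLAIM (what is proved, stated in full; the proofs are below) =====
def Claim_equal_ca_moore_neighborhood : Prop := ∀ (tab : List (List Int)) (num_max_neighbor : Int), Dom_ca_moore_neighborhood tab num_max_neighbor → Spec_ca_moore_neighborhood tab num_max_neighbor (ca_moore_neighborhood tab num_max_neighbor)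


-- ===== LEMMAS AND PROOFS =====

-- the value A writes into cell (y, x) (stated over Nat indices, in List.getD form)
def cellA (tab : List (List Int)) (nmax : Int) (y x : Nat) : Int :=
  if getNumSurrWall tab (x : Int) (y : Int) > nmax then 1
  else if getNumSurrWall tab (x : Int) (y : Int) < nmax then 0
  else (tab.getD y []).getD x 0

def newRow (tab : List (List Int)) (nmax : Int) (y : Nat) : List Int :=
  (List.range (tab.getD y []).length).map (fun x => cellA tab nmax y x)

def targetGrid (tab : List (List Int)) (nmax : Int) : List (List Int) :=
  (List.range tab.length).map (newRow tab nmax)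

lemma pyRange_three (a : Int) :
    PySem.List.pyRange (a - 1) (a + 2) 1 = [a - 1, a, a + 1] := by
  rw [PySem.List.pyRange_one_cons (by omega), PySem.List.pyRange_one_cons (by omega),
    PySem.List.pyRange_one_cons (by omega), PySem.List.pyRange_one_eq_nil (by omega)]
  norm_num

lemma sum_take_one (row : List Int) (k : Nat) (h : k < row.length) :
    (row.take (k + 1)).sum = (row.take k).sum + row.getD k 0 := by
  rw [List.sum_take_succ _ _ h, List.getD_eq_getElem _ _ h]

lemma prefixRow_aux (row : List Int) : ∀ (p0 : List Int) (s0 : Int),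
    (row.foldl (fun (acc : List Int × Int) v => (acc.1 ++ [acc.2 + v], acc.2 + v)) (p0, s0))
    = (p0 ++ (List.range row.length).map (fun k => s0 + (row.take (k + 1)).sum),
        s0 + row.sum) := by
  induction row with
  | nil => simp
  | cons v row ih =>
    intro p0 s0
    simp only [List.foldl_cons, ih, List.length_cons, List.range_succ_eq_map, List.map_cons,
      List.map_map, List.take_succ_cons, List.sum_cons, List.append_assoc, List.cons_append]
    simp [Function.comp_def, add_assoc]

lemma prefixRow_eq (row : List Int) :
    prefixRow row = (List.range (row.length + 1)).map (fun k => (row.take k).sum) := by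
  simp [prefixRow, prefixRow_aux, List.range_succ_eq_map, Function.comp_def]

lemma prefixRow_pyGetD (row : List Int) (i : Int) (h0 : 0 ≤ i) (h1 : i ≤ (row.length : Int)) :
    PySem.List.pyGetD (prefixRow row) i 0 = (row.take i.toNat).sum := by
  rw [PySem.List.pyGetD_eq_getElem _ _ h0 (by simp [prefixRow_eq]; omega)]
  simp [prefixRow_eq]

lemma window3 (row : List Int) (gx : Int) (hgx : 0 ≤ gx) :
    ((if 0 ≤ gx - 1 ∧ gx - 1 < (row.length : Int) then PySem.List.pyGetD row (gx - 1) 0 else 1)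
     + (if 0 ≤ gx ∧ gx < (row.length : Int) then PySem.List.pyGetD row gx 0 else 1)
     + (if 0 ≤ gx + 1 ∧ gx + 1 < (row.length : Int) then PySem.List.pyGetD row (gx + 1) 0 else 1))
    = (if max (gx - 1) 0 < min (gx + 2) (row.length : Int) then
         PySem.List.pyGetD (prefixRow row) (min (gx + 2) (row.length : Int)) 0
           - PySem.List.pyGetD (prefixRow row) (max (gx - 1) 0) 0
       else 0)
      + (3 - (if max (gx - 1) 0 < min (gx + 2) (row.length : Int) then
          min (gx + 2) (row.length : Int) - max (gx - 1) 0 else 0)) := by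
  obtain ⟨n, rfl⟩ := Int.eq_ofNat_of_zero_le hgx
  set L := row.length with hL
  have eget : ∀ j : Nat, PySem.List.pyGetD row ((j:Nat):Int) 0 = row.getD j 0 := fun j => by
    simpa using PySem.List.pyGetD_natCast row j 0
  rcases n with _ | k
  · simp only [Nat.cast_zero]
    by_cases h2 : 0 < L
    · by_cases h3 : 1 < L
      · -- L ≥ 2 : lo = 0, hi = 2
        have hlo : max ((0:Int) - 1) 0 = ((0:Nat):Int) := by omega
        have hhi : min ((0:Int) + 2) (L:Int) = ((2:Nat):Int) := by omega
        rw [hlo, hhi, if_neg (by omega), if_pos (by omega), if_pos (by omega),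
          if_pos (by omega), if_pos (by omega),
          prefixRow_pyGetD _ _ (by omega) (by omega), prefixRow_pyGetD _ _ (by omega) (by omega)]
        simp only [Int.toNat_natCast]
        rw [show (2:Nat) = 1 + 1 from rfl, sum_take_one _ _ (by omega), sum_take_one _ _ (by omega)]
        rw [show ((0:Int)) + 1 = ((1:Nat):Int) by norm_num, eget 1, PySem.List.pyGetD_zero]
        simp; omega
      · -- L = 1 : lo = 0, hi = 1
        have hlo : max ((0:Int) - 1) 0 = ((0:Nat):Int) := by omega
        have hhi : min ((0:Int) + 2) (L:Int) = ((1:Nat):Int) := by omega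
        rw [hlo, hhi, if_neg (by omega), if_pos (by omega), if_neg (by omega),
          if_pos (by omega), if_pos (by omega),
          prefixRow_pyGetD _ _ (by omega) (by omega), prefixRow_pyGetD _ _ (by omega) (by omega)]
        simp only [Int.toNat_natCast]
        rw [show (1:Nat) = 0 + 1 from rfl, sum_take_one _ _ (by omega)]
        rw [PySem.List.pyGetD_zero]
        simp; omega
    · -- L = 0
      rw [if_neg (by omega), if_neg (by omega), if_neg (by omega), if_neg (by omega)]
      omega
  · have e0 : PySem.List.pyGetD row ((((k+1):Nat):Int) - 1) 0 = row.getD k 0 := by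
      rw [show (((k+1):Nat):Int) - 1 = ((k:Nat):Int) by push_cast; ring, eget k]
    have e1 := eget (k+1)
    have e2 : PySem.List.pyGetD row ((((k+1):Nat):Int) + 1) 0 = row.getD (k+1+1) 0 := by
      rw [show (((k+1):Nat):Int) + 1 = (((k+1+1):Nat):Int) by push_cast; ring, eget (k+1+1)]
    have hlo : max ((((k+1):Nat):Int) - 1) 0 = ((k:Nat):Int) := by push_cast; omega
    by_cases h1 : k < L
    · by_cases h3 : k + 2 < L
      · have hhi : min ((((k+1):Nat):Int) + 2) (L:Int) = (((k+1+1+1):Nat):Int) := by push_cast; omega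
        rw [hlo, hhi, if_pos (by push_cast; omega), if_pos (by push_cast; omega),
          if_pos (by push_cast; omega), if_pos (by push_cast; omega), if_pos (by push_cast; omega),
          prefixRow_pyGetD _ _ (by omega) (by omega), prefixRow_pyGetD _ _ (by omega) (by omega)]
        simp only [Int.toNat_natCast]
        rw [sum_take_one _ _ (by omega), sum_take_one _ _ (by omega), sum_take_one _ _ (by omega)]
        rw [e0, e1, e2]; push_cast; simp only [show k+1+1 = k+2 from rfl]; omega
      · by_cases h2 : k + 1 < L
        · have hhi : min ((((k+1):Nat):Int) + 2) (L:Int) = (((k+1+1):Nat):Int) := by push_cast; omega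
          rw [hlo, hhi, if_pos (by push_cast; omega), if_pos (by push_cast; omega),
            if_neg (by push_cast; omega), if_pos (by push_cast; omega), if_pos (by push_cast; omega),
            prefixRow_pyGetD _ _ (by omega) (by omega), prefixRow_pyGetD _ _ (by omega) (by omega)]
          simp only [Int.toNat_natCast]
          rw [sum_take_one _ _ (by omega), sum_take_one _ _ (by omega)]
          rw [e0, e1]; push_cast; omega
        · have hhi : min ((((k+1):Nat):Int) + 2) (L:Int) = (((k+1):Nat):Int) := by push_cast; omega
          rw [hlo, hhi, if_pos (by push_cast; omega), if_neg (by push_cast; omega),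
            if_neg (by push_cast; omega), if_pos (by push_cast; omega), if_pos (by push_cast; omega),
            prefixRow_pyGetD _ _ (by omega) (by omega), prefixRow_pyGetD _ _ (by omega) (by omega)]
          simp only [Int.toNat_natCast]
          rw [sum_take_one _ _ (by omega)]
          rw [e0]; push_cast; omega
    · -- k ≥ L : everything outside the row
      rw [if_neg (by push_cast; omega), if_neg (by push_cast; omega),
        if_neg (by push_cast; omega), if_neg (by push_cast; omega)]
      omega

lemma rowStep (tab : List (List Int)) (r gx : Int) (hgx : 0 ≤ gx) (acc : Int) :
    (PySem.List.pyRange (gx - 1) (gx + 2) 1).foldl (fun wc x =>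
      if 0 ≤ r ∧ r < (tab.length : Int) ∧ 0 ≤ x ∧ x < ((PySem.List.pyGetD tab r []).length : Int) then
        wc + PySem.List.pyGetD (PySem.List.pyGetD tab r []) x 0
      else wc + 1) acc
    = acc + rowWindow tab (tab.map prefixRow) r gx := by
  rw [pyRange_three]
  simp only [List.foldl_cons, List.foldl_nil]
  have hstep : ∀ (wc x : Int),
      (if 0 ≤ r ∧ r < (tab.length : Int) ∧ 0 ≤ x ∧ x < ((PySem.List.pyGetD tab r []).length : Int) then
        wc + PySem.List.pyGetD (PySem.List.pyGetD tab r []) x 0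
      else wc + 1)
      = wc + (if 0 ≤ r ∧ r < (tab.length : Int) ∧ 0 ≤ x ∧ x < ((PySem.List.pyGetD tab r []).length : Int) then
          PySem.List.pyGetD (PySem.List.pyGetD tab r []) x 0 else 1) := by
    intro wc x; split <;> ring
  simp only [hstep]
  by_cases hr : r < 0 ∨ (tab.length : Int) ≤ r
  · rw [rowWindow, if_pos hr]
    have hc : ∀ x : Int,
        ¬(0 ≤ r ∧ r < (tab.length : Int) ∧ 0 ≤ x ∧ x < ((PySem.List.pyGetD tab r []).length : Int)) := by
      intro x hx; rcases hr with h | h <;> omega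
    rw [if_neg (hc _), if_neg (hc _), if_neg (hc _)]
    ring
  · have h0 : 0 ≤ r := by omega
    have hlt : r < (tab.length : Int) := by omega
    have hpr : PySem.List.pyGetD (tab.map prefixRow) r [] = prefixRow (PySem.List.pyGetD tab r []) := by
      rw [PySem.List.pyGetD_eq_getElem _ _ h0 (by simpa using hlt),
        PySem.List.pyGetD_eq_getElem _ _ h0 hlt, List.getElem_map]
    have hc : ∀ x : Int,
        (0 ≤ r ∧ r < (tab.length : Int) ∧ 0 ≤ x ∧ x < ((PySem.List.pyGetD tab r []).length : Int))
        ↔ (0 ≤ x ∧ x < ((PySem.List.pyGetD tab r []).length : Int)) := by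
      intro x; constructor
      · rintro ⟨_, _, a, b⟩; exact ⟨a, b⟩
      · rintro ⟨a, b⟩; exact ⟨h0, hlt, a, b⟩
    simp only [hc]
    rw [rowWindow, if_neg hr]
    simp only [hpr]
    rw [add_assoc, add_assoc]
    congr 1
    rw [← add_assoc]
    exact window3 (PySem.List.pyGetD tab r []) gx hgx

lemma wall_eq (tab : List (List Int)) (gx gy : Int) (hgx : 0 ≤ gx) :
    getNumSurrWall tab gx gy
    = rowWindow tab (tab.map prefixRow) (gy - 1) gx + rowWindow tab (tab.map prefixRow) gy gx +
      rowWindow tab (tab.map prefixRow) (gy + 1) gx := by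
  unfold getNumSurrWall
  rw [pyRange_three gy]
  simp only [List.foldl_cons, List.foldl_nil]
  rw [rowStep tab (gy - 1) gx hgx, rowStep tab gy gx hgx, rowStep tab (gy + 1) gx hgx]
  ring

lemma alt_eq_target (tab : List (List Int)) (nmax : Int) :
    ca_moore_neighborhood_alt tab nmax = targetGrid tab nmax := by
  unfold ca_moore_neighborhood_alt targetGrid
  apply List.ext_getElem
  · simp [PySem.List.length_enumerate]
  intro i h1 h2
  have hi : i < tab.length := by simpa [PySem.List.length_enumerate] using h1
  simp only [List.getElem_map, PySem.List.getElem_enumerate, List.getElem_range]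
  unfold newRow
  apply List.ext_getElem
  · simp [PySem.List.length_enumerate, List.getElem?_eq_getElem hi]
  intro j h3 h4
  have hj : j < tab[i].length := by simpa [PySem.List.length_enumerate] using h3
  simp only [List.getElem_map, PySem.List.getElem_enumerate, List.getElem_range, zero_add]
  unfold cellA
  rw [wall_eq tab (↑j) (↑i) (Int.natCast_nonneg j),
    List.getD_eq_getElem _ _ hi, List.getD_eq_getElem _ _ hj]

lemma fold2_set (g : Nat → Int) (xs : List Nat) : ∀ (nt : List (List Int)) (y : Nat), y < nt.length →
    xs.foldl (fun nt x => nt.set y ((nt.getD y []).set x (g x))) nt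
    = nt.set y (xs.foldl (fun r x => r.set x (g x)) (nt.getD y [])) := by
  induction xs with
  | nil =>
    intro nt y hy
    rw [List.foldl_nil, List.foldl_nil, List.getD_eq_getElem _ _ hy, List.set_getElem_self]
  | cons x xs ih =>
    intro nt y hy
    simp only [List.foldl_cons]
    rw [ih _ y (by simpa using hy), List.set_set]
    congr 1
    rw [List.getD_eq_getElem _ _ (by simpa using hy), List.getElem_set_self]

lemma row_fold_range (f : Nat → Int) : ∀ (k : Nat) (r0 : List Int), k ≤ r0.length →
    (List.range k).foldl (fun r x => r.set x (f x)) r0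
    = (List.range k).map (fun x => f x) ++ r0.drop k := by
  intro k
  induction k with
  | zero => simp
  | succ k ih =>
    intro r0 hk
    rw [List.range_succ, List.foldl_append, ih r0 (by omega)]
    simp only [List.foldl_cons, List.foldl_nil]
    rw [List.map_append]
    have hlen : ((List.range k).map (fun x => f x)).length = k := by simp
    rw [List.set_append_right _ _ (by omega)]
    simp only [hlen, Nat.sub_self]
    rw [List.drop_eq_getElem_cons (by omega : k < r0.length), List.set_cons_zero]
    simp

lemma grid_fold (g : Nat → Nat → Int) (ms : Nat → Nat) :
    ∀ (k : Nat) (nt0 : List (List Int)), k ≤ nt0.length →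
    (∀ y, y < nt0.length → (nt0.getD y []).length = ms y) →
    (List.range k).foldl (fun nt y =>
      (List.range (ms y)).foldl (fun nt x => nt.set y ((nt.getD y []).set x (g y x))) nt) nt0
    = (List.range k).map (fun y => (List.range (ms y)).map (fun x => g y x)) ++ nt0.drop k := by
  intro k
  induction k with
  | zero => simp
  | succ k ih =>
    intro nt0 hk hms
    rw [List.range_succ, List.foldl_append, ih nt0 (by omega) hms]
    simp only [List.foldl_cons, List.foldl_nil]
    set mapped := (List.range k).map (fun y => (List.range (ms y)).map (fun x => g y x)) with hm
    have hmlen : mapped.length = k := by simp [hm]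
    have hLen : (mapped ++ nt0.drop k).length = nt0.length := by simp [hmlen]; omega
    have hyk : k < (mapped ++ nt0.drop k).length := by omega
    rw [fold2_set _ _ _ k hyk]
    have hgetk : (mapped ++ nt0.drop k).getD k [] = nt0.getD k [] := by
      rw [List.getD_eq_getElem _ _ (by omega), List.getD_eq_getElem _ _ (by omega),
        List.getElem_append_right (by omega)]
      simp [hmlen]
    have hmsk : (nt0.getD k []).length = ms k := hms k (by omega)
    rw [hgetk, row_fold_range _ _ _ (by omega), ← hmsk, List.drop_length, List.append_nil]
    rw [List.map_append, List.set_append_right _ _ (by omega)]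
    simp only [hmlen, Nat.sub_self]
    rw [hmsk, List.drop_eq_getElem_cons (by omega : k < nt0.length), List.set_cons_zero, ← hm]
    simp

lemma a_eq_target (tab : List (List Int)) (nmax : Int) :
    ca_moore_neighborhood tab nmax = targetGrid tab nmax := by
  unfold ca_moore_neighborhood
  simp only [PySem.List.pyRange_zero_natCast, List.foldl_map, List.map_map,
    PySem.List.pyGetD_natCast, PySem.List.pySetD_natCast]
  refine Eq.trans (grid_fold (fun y x => cellA tab nmax y x)
    (fun y => (tab.getD y []).length) tab.length _ (by simp) ?_) ?_
  · intro y hy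
    have hy' : y < tab.length := by simpa using hy
    rw [List.getD_eq_getElem _ _ hy]
    simp [PySem.List.pyGetD_natCast]
  · rw [List.drop_eq_nil_of_le (by simp), List.append_nil]
    unfold targetGrid newRow
    rfl

-- ===== VERDICT (by name: the statement is the Claim_ definition above) =====
theorem ca_moore_neighborhood_spec : Claim_equal_ca_moore_neighborhood := by
  intro tab nmax _
  unfold Spec_ca_moore_neighborhood
  rw [a_eq_target, alt_eq_target]
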